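-- pv_equiv track=rewrite | github.com/wthered/postFilm | similarity_functions.py | normalise_vectors
-- ===== SOURCE A (Python) =====
-- def normalise_vectors(original_one, list_one, original_two, list_two):
-- 	source_entries = [entry.get('id') for entry in original_one] if original_one else []
-- 	target_entries = [entry.get('id') for entry in original_two] if original_two else []
--
-- 	# Get the unique join of both arrays
-- 	joined = list(set(source_entries) | set(target_entries))
--
-- 	# Iterate through the joined array and populate list_one and list_two
-- 	for value in sorted(joined):
-- 		list_one.append(1 if value in source_entries else 0)
-- 		list_two.append(1 if value in target_entries else 0)
--
-- 	# Return the two lists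
-- 	return list_one, list_two
-- ===== SOURCE B (Python) =====
-- def normalise_vectors(original_one, list_one, original_two, list_two):
-- 	# Sort each side's distinct ids separately, then walk both sorted lists
-- 	# with two pointers, emitting (1,1)/(1,0)/(0,1) per union element in order.
-- 	source = sorted(set(entry.get('id') for entry in original_one)) if original_one else []
-- 	target = sorted(set(entry.get('id') for entry in original_two)) if original_two else []
-- 	i = j = 0
-- 	while i < len(source) and j < len(target):
-- 		if source[i] == target[j]:
-- 			list_one.append(1)
-- 			list_two.append(1)
-- 			i += 1
-- 			j += 1
-- 		elif source[i] < target[j]: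
-- 			list_one.append(1)
-- 			list_two.append(0)
-- 			i += 1
-- 		else:
-- 			list_one.append(0)
-- 			list_two.append(1)
-- 			j += 1
-- 	while i < len(source):
-- 		list_one.append(1)
-- 		list_two.append(0)
-- 		i += 1
-- 	while j < len(target):
-- 		list_one.append(0)
-- 		list_two.append(1)
-- 		j += 1
-- 	return list_one, list_two
-- ===== Notes on version B (the rewrite author's own statement) =====
-- stated objective: alternative
-- what changed: A sorts the union of both id sets and runs two list-membership scans per union value; B sorts each side's distinct ids separately and emits both flag vectors in a single two-pointer merge of the two sorted lists, with no membership tests.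
import Mathlib
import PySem

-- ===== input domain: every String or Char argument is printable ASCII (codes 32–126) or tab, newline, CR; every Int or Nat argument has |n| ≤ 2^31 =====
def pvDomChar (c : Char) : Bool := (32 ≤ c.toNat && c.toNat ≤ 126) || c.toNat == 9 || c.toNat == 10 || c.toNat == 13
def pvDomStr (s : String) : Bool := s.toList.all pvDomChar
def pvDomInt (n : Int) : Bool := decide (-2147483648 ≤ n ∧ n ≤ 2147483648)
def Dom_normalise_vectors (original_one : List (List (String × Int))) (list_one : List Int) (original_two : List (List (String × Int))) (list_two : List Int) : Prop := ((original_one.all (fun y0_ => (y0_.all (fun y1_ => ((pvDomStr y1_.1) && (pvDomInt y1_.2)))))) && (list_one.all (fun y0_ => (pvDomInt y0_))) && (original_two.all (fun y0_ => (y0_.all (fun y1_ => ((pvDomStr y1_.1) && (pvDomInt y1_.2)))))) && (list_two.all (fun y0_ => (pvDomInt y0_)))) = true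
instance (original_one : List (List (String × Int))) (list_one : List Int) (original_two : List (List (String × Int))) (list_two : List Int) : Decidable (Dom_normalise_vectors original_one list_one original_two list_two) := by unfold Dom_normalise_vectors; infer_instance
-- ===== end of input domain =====

-- B replaces A's sorted-union loop with its two membership tests per value by a two-pointer
-- merge of the two per-side sorted distinct id lists, emitting the flag pairs during the merge
-- (objective: alternative). Both Pythons mutate list_one/list_two in place by appending
-- (identically); the equivalence proved here is about the RETURN value.

-- ===== PORT A =====
-- entry.get('id') : the entry dict looked up as a Python dict (first match); none = missing key
def nvId (entry : List (String × Int)) : Option Int := (PySem.Dict.mk entry).get? "id"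

-- '[entry.get('id') for entry in original] if original else []'
def nvIds (orig : List (List (String × Int))) : List (Option Int) :=
  if orig.isEmpty then [] else orig.map nvId

-- sort key for the id values: inside Pre_ the compared values are either all `some` (ordered
-- by the int, as Python orders ints) or all `none` (no unequal comparison is performed); on
-- the mixed case — excluded by Pre_, where Python raises TypeError — the key's value is irrelevant
def nvKey : Option Int → Int
  | none => 0
  | some n => n

def normalise_vectors (original_one : List (List (String × Int))) (list_one : List Int) (original_two : List (List (String × Int))) (list_two : List Int) : List Int × List Int :=
  let source_entries := nvIds original_one
  let target_entries := nvIds original_two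
  -- joined = list(set(source_entries) | set(target_entries)); consumed only through sorted
  let joined : PySem.Set (Option Int) :=
    PySem.Set.union (PySem.Set.ofList source_entries) (PySem.Set.ofList target_entries)
  (PySem.List.sorted joined nvKey).foldl
    (fun acc value =>
      (acc.1 ++ [if source_entries.contains value then 1 else 0],
       acc.2 ++ [if target_entries.contains value then 1 else 0]))
    (list_one, list_two)

-- ===== PORT B =====
-- 'sorted(set(entry.get('id') for entry in original)) if original else []'
def nvSide (orig : List (List (String × Int))) : List (Option Int) :=
  if orig.isEmpty then [] else PySem.List.sorted (PySem.Set.ofList (orig.map nvId)) nvKey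

-- B's three while loops: two pointers over the two sorted id lists, one flag pair appended per
-- union element ('==' is Python equality of the id values; '<' compares via nvKey, see above)
def nvMerge : List (Option Int) → List (Option Int) → List Int × List Int
  | [], [] => ([], [])
  | _ :: xs, [] =>
    match nvMerge xs [] with
    | (p, q) => (1 :: p, 0 :: q)
  | [], _ :: ys =>
    match nvMerge [] ys with
    | (p, q) => (0 :: p, 1 :: q)
  | x :: xs, y :: ys =>
    if x = y then
      match nvMerge xs ys with
      | (p, q) => (1 :: p, 1 :: q)
    else if nvKey x < nvKey y then
      match nvMerge xs (y :: ys) with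
      | (p, q) => (1 :: p, 0 :: q)
    else
      match nvMerge (x :: xs) ys with
      | (p, q) => (0 :: p, 1 :: q)
termination_by a b => a.length + b.length

def normalise_vectors_alt (original_one : List (List (String × Int))) (list_one : List Int) (original_two : List (List (String × Int))) (list_two : List Int) : List Int × List Int :=
  let source := nvSide original_one
  let target := nvSide original_two
  let r := nvMerge source target
  (list_one ++ r.1, list_two ++ r.2)

-- ===== PRECONDITION & SPEC =====
def nvHasId (entry : List (String × Int)) : Bool := (nvId entry).isSome

-- Pre_ excludes exactly the inputs where some entry has an 'id' key and another lacks it: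
-- there Python compares None with an int (in A's sorted(), in B's sort or '<') and both raise TypeError.
def Pre_normalise_vectors (original_one : List (List (String × Int))) (list_one : List Int) (original_two : List (List (String × Int))) (list_two : List Int) : Prop :=
  ((original_one ++ original_two).all nvHasId
    || (original_one ++ original_two).all (fun e => !nvHasId e)) = true
instance (original_one : List (List (String × Int))) (list_one : List Int) (original_two : List (List (String × Int))) (list_two : List Int) : Decidable (Pre_normalise_vectors original_one list_one original_two list_two) := by unfold Pre_normalise_vectors; infer_instance

def pvWitness_normalise_vectors : (List (List (String × Int))) × List Int × (List (List (String × Int))) × List Int :=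
  ([[("id", 1)]], [], [[("id", 2)]], [])

def Spec_normalise_vectors (original_one : List (List (String × Int))) (list_one : List Int) (original_two : List (List (String × Int))) (list_two : List Int) (out : List Int × List Int) : Prop := out = normalise_vectors_alt original_one list_one original_two list_two
instance (original_one : List (List (String × Int))) (list_one : List Int) (original_two : List (List (String × Int))) (list_two : List Int) (out : List Int × List Int) : Decidable (Spec_normalise_vectors original_one list_one original_two list_two out) := by unfold Spec_normalise_vectors; infer_instance

-- ===== CLAIM (what is proved, stated in full; the proofs are below) =====
def Claim_equal_normalise_vectors : Prop := ∀ (original_one : List (List (String × Int))) (list_one : List Int) (original_two : List (List (String × Int))) (list_two : List Int), Dom_normalise_vectors original_one list_one original_two list_two → Pre_normalise_vectors original_one list_one original_two list_two → Spec_normalise_vectors original_one list_one original_two list_two (normalise_vectors original_one list_one original_two list_two)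

-- ===== LEMMAS AND PROOFS =====

theorem nvIds_eq (orig : List (List (String × Int))) : nvIds orig = orig.map nvId := by
  cases orig <;> simp [nvIds]

theorem nvSide_eq (orig : List (List (String × Int))) :
    nvSide orig = PySem.List.sorted (PySem.Set.ofList (orig.map nvId)) nvKey := by
  cases orig <;> simp [nvSide, PySem.List.sorted]

-- the union merge of the two sorted id lists (proof-only skeleton of nvMerge's traversal)
def nvMergeU : List (Option Int) → List (Option Int) → List (Option Int)
  | [], [] => []
  | x :: xs, [] => x :: nvMergeU xs []
  | [], y :: ys => y :: nvMergeU [] ys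
  | x :: xs, y :: ys =>
    if x = y then x :: nvMergeU xs ys
    else if nvKey x < nvKey y then x :: nvMergeU xs (y :: ys)
    else y :: nvMergeU (x :: xs) ys
termination_by a b => a.length + b.length

theorem mem_nvMergeU (a b : List (Option Int)) (v : Option Int) :
    v ∈ nvMergeU a b ↔ v ∈ a ∨ v ∈ b := by
  fun_induction nvMergeU a b with
  | case1 => simp
  | case2 x xs ih => simp only [List.mem_cons, List.not_mem_nil, ih]; tauto
  | case3 y ys ih => simp only [List.mem_cons, List.not_mem_nil, ih]; tauto
  | case4 xs y ys ih => simp only [List.mem_cons, ih]; tauto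
  | case5 x xs y ys hne hlt ih => simp only [List.mem_cons, ih]; tauto
  | case6 x xs y ys hne hnlt ih => simp only [List.mem_cons, ih]; tauto

theorem nvMergeU_pairwise (a b : List (Option Int))
    (ha : a.Pairwise (fun u v => nvKey u < nvKey v))
    (hb : b.Pairwise (fun u v => nvKey u < nvKey v))
    (hx : ∀ u ∈ a, ∀ v ∈ b, nvKey u = nvKey v → u = v) :
    (nvMergeU a b).Pairwise (fun u v => nvKey u < nvKey v) := by
  fun_induction nvMergeU a b with
  | case1 => simp
  | case2 x xs ih =>
    rcases List.pairwise_cons.1 ha with ⟨h1, h2⟩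
    refine List.pairwise_cons.2 ⟨fun v hv => ?_, ih h2 hb (by simp)⟩
    rcases (mem_nvMergeU xs [] v).1 hv with h' | h'
    · exact h1 v h'
    · simp at h'
  | case3 y ys ih =>
    rcases List.pairwise_cons.1 hb with ⟨h1, h2⟩
    refine List.pairwise_cons.2 ⟨fun v hv => ?_, ih (by simp) h2 (by simp)⟩
    rcases (mem_nvMergeU [] ys v).1 hv with h' | h'
    · simp at h'
    · exact h1 v h'
  | case4 xs y ys ih =>
    rcases List.pairwise_cons.1 ha with ⟨ha1, ha2⟩
    rcases List.pairwise_cons.1 hb with ⟨hb1, hb2⟩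
    refine List.pairwise_cons.2 ⟨fun v hv => ?_,
      ih ha2 hb2 (fun u hu v hv => hx u (by simp [hu]) v (by simp [hv]))⟩
    rcases (mem_nvMergeU xs ys v).1 hv with h' | h'
    · exact ha1 v h'
    · exact hb1 v h'
  | case5 x xs y ys hne hlt ih =>
    rcases List.pairwise_cons.1 ha with ⟨ha1, ha2⟩
    refine List.pairwise_cons.2 ⟨fun v hv => ?_,
      ih ha2 hb (fun u hu v hv => hx u (by simp [hu]) v hv)⟩
    rcases (mem_nvMergeU xs (y :: ys) v).1 hv with h' | h'
    · exact ha1 v h'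
    · rcases List.mem_cons.1 h' with rfl | h''
      · exact hlt
      · exact lt_trans hlt (List.rel_of_pairwise_cons hb h'')
  | case6 x xs y ys hne hnlt ih =>
    rcases List.pairwise_cons.1 hb with ⟨hb1, hb2⟩
    have hyx : nvKey y < nvKey x := by
      rcases lt_or_eq_of_le (not_lt.1 hnlt) with h3 | h3
      · exact h3
      · exact absurd (hx x (by simp) y (by simp) h3.symm) hne
    refine List.pairwise_cons.2 ⟨fun v hv => ?_,
      ih ha hb2 (fun u hu v hv => hx u hu v (by simp [hv]))⟩
    rcases (mem_nvMergeU (x :: xs) ys v).1 hv with h' | h'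
    · rcases List.mem_cons.1 h' with rfl | h''
      · exact hyx
      · exact lt_trans hyx (List.rel_of_pairwise_cons ha h'')
    · exact hb1 v h'

theorem nvMerge_eq (a b : List (Option Int))
    (ha : a.Pairwise (fun u v => nvKey u < nvKey v))
    (hb : b.Pairwise (fun u v => nvKey u < nvKey v))
    (hx : ∀ u ∈ a, ∀ v ∈ b, nvKey u = nvKey v → u = v) :
    nvMerge a b = ((nvMergeU a b).map (fun v => if v ∈ a then (1 : Int) else 0),
                   (nvMergeU a b).map (fun v => if v ∈ b then (1 : Int) else 0)) := by
  fun_induction nvMerge a b with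
  | case1 => simp [nvMergeU]
  | case2 x xs p q hpq ih =>
    rcases List.pairwise_cons.1 ha with ⟨ha1, ha2⟩
    have h' := hpq.symm.trans (ih ha2 hb (by simp))
    rw [Prod.mk.injEq] at h'
    obtain ⟨hp, hq⟩ := h'
    subst hp; subst hq
    rw [nvMergeU]
    have tail1 : List.map (fun v => if v ∈ xs then (1 : Int) else 0) (nvMergeU xs []) =
        List.map (fun v => if v ∈ x :: xs then (1 : Int) else 0) (nvMergeU xs []) := by
      refine List.map_congr_left fun u hu => ?_
      have : u ∈ xs := by simpa using (mem_nvMergeU xs [] u).1 hu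
      simp [this]
    simp [tail1]
  | case3 y ys p q hpq ih =>
    rcases List.pairwise_cons.1 hb with ⟨hb1, hb2⟩
    have h' := hpq.symm.trans (ih (by simp) hb2 (by simp))
    rw [Prod.mk.injEq] at h'
    obtain ⟨hp, hq⟩ := h'
    subst hp; subst hq
    rw [nvMergeU]
    have tail2 : List.map (fun v => if v ∈ ys then (1 : Int) else 0) (nvMergeU [] ys) =
        List.map (fun v => if v ∈ y :: ys then (1 : Int) else 0) (nvMergeU [] ys) := by
      refine List.map_congr_left fun u hu => ?_
      have : u ∈ ys := by simpa using (mem_nvMergeU [] ys u).1 hu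
      simp [this]
    simp [tail2]
  | case4 xs y ys p q hpq ih =>
    rcases List.pairwise_cons.1 ha with ⟨ha1, ha2⟩
    rcases List.pairwise_cons.1 hb with ⟨hb1, hb2⟩
    have h' := hpq.symm.trans (ih ha2 hb2 (fun u hu v hv => hx u (by simp [hu]) v (by simp [hv])))
    rw [Prod.mk.injEq] at h'
    obtain ⟨hp, hq⟩ := h'
    subst hp; subst hq
    rw [nvMergeU]
    have tail1 : List.map (fun v => if v ∈ xs then (1 : Int) else 0) (nvMergeU xs ys) =
        List.map (fun v => if v ∈ y :: xs then (1 : Int) else 0) (nvMergeU xs ys) := by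
      refine List.map_congr_left fun u hu => ?_
      rcases (mem_nvMergeU xs ys u).1 hu with h' | h'
      · simp [h']
      · have : u ≠ y := fun he => absurd (he ▸ hb1 u h') (lt_irrefl _)
        simp [this]
    have tail2 : List.map (fun v => if v ∈ ys then (1 : Int) else 0) (nvMergeU xs ys) =
        List.map (fun v => if v ∈ y :: ys then (1 : Int) else 0) (nvMergeU xs ys) := by
      refine List.map_congr_left fun u hu => ?_
      rcases (mem_nvMergeU xs ys u).1 hu with h' | h'
      · have : u ≠ y := fun he => absurd (he ▸ ha1 u h') (lt_irrefl _)
        simp [this]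
      · simp [h']
    simp [tail1, tail2]
  | case5 x xs y ys hne hlt p q hpq ih =>
    rcases List.pairwise_cons.1 ha with ⟨ha1, ha2⟩
    have h' := hpq.symm.trans (ih ha2 hb (fun u hu v hv => hx u (by simp [hu]) v hv))
    rw [Prod.mk.injEq] at h'
    obtain ⟨hp, hq⟩ := h'
    subst hp; subst hq
    rw [nvMergeU]
    have hxys : x ∉ ys := fun h'' =>
      absurd (lt_trans hlt (List.rel_of_pairwise_cons hb h'')) (lt_irrefl _)
    have tail1 : List.map (fun v => if v ∈ xs then (1 : Int) else 0) (nvMergeU xs (y :: ys)) =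
        List.map (fun v => if v ∈ x :: xs then (1 : Int) else 0) (nvMergeU xs (y :: ys)) := by
      refine List.map_congr_left fun u hu => ?_
      rcases (mem_nvMergeU xs (y :: ys) u).1 hu with h' | h'
      · simp [h']
      · have : u ≠ x := by
          rintro rfl
          rcases List.mem_cons.1 h' with rfl | h''
          · exact hne rfl
          · exact hxys h''
        simp [this]
    simp [tail1, hne, hlt, hxys]
  | case6 x xs y ys hne hnlt p q hpq ih =>
    rcases List.pairwise_cons.1 hb with ⟨hb1, hb2⟩
    have hyx : nvKey y < nvKey x := by
      rcases lt_or_eq_of_le (not_lt.1 hnlt) with h3 | h3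
      · exact h3
      · exact absurd (hx x (by simp) y (by simp) h3.symm) hne
    have h' := hpq.symm.trans (ih ha hb2 (fun u hu v hv => hx u hu v (by simp [hv])))
    rw [Prod.mk.injEq] at h'
    obtain ⟨hp, hq⟩ := h'
    subst hp; subst hq
    rw [nvMergeU]
    have hyxs : y ∉ xs := fun h'' =>
      absurd (lt_trans hyx (List.rel_of_pairwise_cons ha h'')) (lt_irrefl _)
    have hyne : y ≠ x := fun he => hne he.symm
    have tail2 : List.map (fun v => if v ∈ ys then (1 : Int) else 0) (nvMergeU (x :: xs) ys) =
        List.map (fun v => if v ∈ y :: ys then (1 : Int) else 0) (nvMergeU (x :: xs) ys) := by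
      refine List.map_congr_left fun u hu => ?_
      rcases (mem_nvMergeU (x :: xs) ys u).1 hu with h' | h'
      · have : u ≠ y := by
          rintro rfl
          rcases List.mem_cons.1 h' with he | h''
          · exact hne he.symm
          · exact hyxs h''
        simp [this]
      · simp [h']
    simp [tail2, hne, hnlt, hyne, hyxs]

theorem pairwise_lt_of_le_inj (key : Option Int → Int) (l : List (Option Int))
    (h1 : l.Pairwise (fun u v => key u ≤ key v)) (h2 : l.Nodup)
    (h3 : ∀ u ∈ l, ∀ v ∈ l, key u = key v → u = v) :
    l.Pairwise (fun u v => key u < key v) := by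
  induction l with
  | nil => simp
  | cons x xs ih =>
    rcases List.pairwise_cons.1 h1 with ⟨h11, h12⟩
    rcases List.nodup_cons.1 h2 with ⟨hx, hnd⟩
    refine List.pairwise_cons.2 ⟨fun v hv => lt_of_le_of_ne (h11 v hv) (fun he => ?_),
      ih h12 hnd (fun u hu v hv => h3 u (by simp [hu]) v (by simp [hv]))⟩
    exact hx ((h3 x (by simp) v (by simp [hv]) he) ▸ hv)

-- ===== VERDICT (by name: the statement is the Claim_ definition above) =====
theorem normalise_vectors_spec : Claim_equal_normalise_vectors := by
  intro o1 l1 o2 l2 _ hpre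
  unfold Spec_normalise_vectors
  unfold Pre_normalise_vectors at hpre
  -- id-key injectivity on every id occurring in the input, from Pre_
  have KI : ∀ u, (u ∈ o1.map nvId ∨ u ∈ o2.map nvId) →
      ∀ v, (v ∈ o1.map nvId ∨ v ∈ o2.map nvId) → nvKey u = nvKey v → u = v := by
    rw [Bool.or_eq_true] at hpre
    rcases hpre with h | h <;>
      simp only [List.all_append, Bool.and_eq_true, List.all_eq_true] at h
    · rintro u hu v hv hk
      have hus : ∀ w, (w ∈ o1.map nvId ∨ w ∈ o2.map nvId) → w = some (nvKey w) := by
        rintro w (hw | hw) <;> rcases List.mem_map.1 hw with ⟨e, he, rfl⟩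
        · rcases Option.isSome_iff_exists.1 (h.1 e he) with ⟨k, hk'⟩
          simp [hk', nvKey]
        · rcases Option.isSome_iff_exists.1 (h.2 e he) with ⟨k, hk'⟩
          simp [hk', nvKey]
      rw [hus u hu, hus v hv, hk]
    · rintro u hu v hv _
      have hun : ∀ w, (w ∈ o1.map nvId ∨ w ∈ o2.map nvId) → w = none := by
        rintro w (hw | hw) <;> rcases List.mem_map.1 hw with ⟨e, he, rfl⟩
        · simpa [nvHasId] using h.1 e he
        · simpa [nvHasId] using h.2 e he
      rw [hun u hu, hun v hv]
  have KI1 : ∀ u ∈ o1.map nvId, ∀ v ∈ o1.map nvId, nvKey u = nvKey v → u = v :=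
    fun u hu v hv => KI u (Or.inl hu) v (Or.inl hv)
  have KI2 : ∀ u ∈ o2.map nvId, ∀ v ∈ o2.map nvId, nvKey u = nvKey v → u = v :=
    fun u hu v hv => KI u (Or.inr hu) v (Or.inr hv)
  -- strictly increasing per-side sorted distinct id lists
  have memA : ∀ v, v ∈ nvSide o1 ↔ v ∈ o1.map nvId := by
    intro v
    rw [nvSide_eq, PySem.List.mem_sorted, PySem.Set.mem_ofList]
  have memB : ∀ v, v ∈ nvSide o2 ↔ v ∈ o2.map nvId := by
    intro v
    rw [nvSide_eq, PySem.List.mem_sorted, PySem.Set.mem_ofList]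
  have hA : (nvSide o1).Pairwise (fun u v => nvKey u < nvKey v) := by
    refine pairwise_lt_of_le_inj nvKey _ ?_ ?_ (fun u hu v hv => KI1 u ((memA u).1 hu) v ((memA v).1 hv))
    · rw [nvSide_eq]; exact PySem.List.sorted_pairwise _ _
    · rw [nvSide_eq]
      exact ((PySem.List.sorted_perm _ nvKey false).nodup_iff).2 (PySem.Set.nodup_ofList _)
  have hB : (nvSide o2).Pairwise (fun u v => nvKey u < nvKey v) := by
    refine pairwise_lt_of_le_inj nvKey _ ?_ ?_ (fun u hu v hv => KI2 u ((memB u).1 hu) v ((memB v).1 hv))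
    · rw [nvSide_eq]; exact PySem.List.sorted_pairwise _ _
    · rw [nvSide_eq]
      exact ((PySem.List.sorted_perm _ nvKey false).nodup_iff).2 (PySem.Set.nodup_ofList _)
  have hX : ∀ u ∈ nvSide o1, ∀ v ∈ nvSide o2, nvKey u = nvKey v → u = v :=
    fun u hu v hv => KI u (Or.inl ((memA u).1 hu)) v (Or.inr ((memB v).1 hv))
  -- A's sorted union IS the merge skeleton of B's two sorted lists
  have hMpw := nvMergeU_pairwise _ _ hA hB hX
  have hMnd : (nvMergeU (nvSide o1) (nvSide o2)).Nodup :=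
    hMpw.imp (fun {u v} h => fun he => absurd (he ▸ h) (lt_irrefl _))
  have hUnion : PySem.List.sorted
      (PySem.Set.union (PySem.Set.ofList (nvIds o1)) (PySem.Set.ofList (nvIds o2))) nvKey
      = nvMergeU (nvSide o1) (nvSide o2) := by
    refine PySem.List.sorted_eq_of_perm_of_pairwise_lt _ _ nvKey ?_ hMpw
    refine (List.perm_ext_iff_of_nodup hMnd (PySem.Set.nodup_union _ _
      (PySem.Set.nodup_ofList _))).2 ?_
    intro v
    rw [mem_nvMergeU, memA, memB, PySem.Set.mem_union, PySem.Set.mem_ofList,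
      PySem.Set.mem_ofList, nvIds_eq, nvIds_eq]
  -- evaluate both ports
  simp only [normalise_vectors, normalise_vectors_alt]
  rw [PySem.List.foldl_prod_mk
      (f := fun a v => a ++ [if (nvIds o1).contains v then (1 : Int) else 0])
      (g := fun a v => a ++ [if (nvIds o2).contains v then (1 : Int) else 0]),
    PySem.List.foldl_append_singleton_eq_map, PySem.List.foldl_append_singleton_eq_map]
  rw [nvMerge_eq _ _ hA hB hX, hUnion, Prod.mk.injEq]
  constructor
  · refine congrArg _ (List.map_congr_left fun v _ => ?_)
    by_cases h : v ∈ nvSide o1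
    · have : v ∈ nvIds o1 := by rw [nvIds_eq]; exact (memA v).1 h
      simp [h, this]
    · have : v ∉ nvIds o1 := by rw [nvIds_eq]; exact fun hc => h ((memA v).2 hc)
      simp [h, this]
  · refine congrArg _ (List.map_congr_left fun v _ => ?_)
    by_cases h : v ∈ nvSide o2
    · have : v ∈ nvIds o2 := by rw [nvIds_eq]; exact (memB v).1 h
      simp [h, this]
    · have : v ∉ nvIds o2 := by rw [nvIds_eq]; exact fun hc => h ((memB v).2 hc)
      simp [h, this]
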